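-- pv_equiv track=rewrite | github.com/donghyuk454/pccp-study | lv2/feature-development.py | solution
-- ===== SOURCE A (Python) =====
-- def solution(progresses, speeds):
--     answer = []
--     remain_days = [ ((100-progresses[i]) // speeds[i]) for i in range(len(progresses))]
--
--     for i in range(len(remain_days)):
--         if (100-progresses[i])%speeds[i] != 0:
--             remain_days[i] += 1
--
--     while remain_days:
--         now_day = remain_days.pop(0)
--         release_count = 1
--
--         while remain_days:
--             if remain_days[0] > now_day:
--                 break
--             remain_days.pop(0)
--             release_count += 1
--
--         answer.append(release_count)
--
--     return answer
-- ===== SOURCE B (Python) =====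
-- def solution(progresses, speeds):
--     answer = []
--     current = 0
--     for p, s in zip(progresses, speeds):
--         d = (100 - p) // s + (1 if (100 - p) % s != 0 else 0)
--         if answer and d <= current:
--             answer[-1] += 1
--         else:
--             answer.append(1)
--             current = d
--     return answer
-- ===== Notes on version B (the rewrite author's own statement) =====
-- stated objective: faster
-- what changed: Replaces A's three passes (floordiv list, +1 fixup loop, nested pop(0)-based grouping) with a single forward pass over zip(progresses, speeds) that computes each completion day inline and either opens a new group or increments the last count.
import Mathlib
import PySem

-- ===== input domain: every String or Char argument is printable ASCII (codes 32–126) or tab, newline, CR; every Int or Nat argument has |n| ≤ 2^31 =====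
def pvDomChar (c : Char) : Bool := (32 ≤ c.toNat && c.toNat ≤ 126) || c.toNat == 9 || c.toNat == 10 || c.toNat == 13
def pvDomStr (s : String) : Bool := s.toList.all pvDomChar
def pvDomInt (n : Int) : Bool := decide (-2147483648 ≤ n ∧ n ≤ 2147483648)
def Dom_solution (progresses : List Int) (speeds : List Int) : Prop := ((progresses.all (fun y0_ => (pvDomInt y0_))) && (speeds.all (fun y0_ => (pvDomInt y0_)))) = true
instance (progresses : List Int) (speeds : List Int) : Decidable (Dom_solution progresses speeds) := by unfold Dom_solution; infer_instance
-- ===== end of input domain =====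

-- B is structurally different (single pass, no nested pop loop); equivalence is about the return value (A mutates only its local list).

-- ===== PORT A =====
-- inner while loop: pop elements ≤ now_day, counting them; returns (release_count, rest)
def consumeA (now_day : Int) (release_count : Int) : List Int → Int × List Int
  | [] => (release_count, [])
  | x :: xs => if x > now_day then (release_count, x :: xs) else consumeA now_day (release_count + 1) xs

theorem consumeA_snd_length (now c : Int) (l : List Int) : (consumeA now c l).2.length ≤ l.length := by
  induction l generalizing c with
  | nil => simp [consumeA]
  | cons x xs ih =>
    simp only [consumeA]
    split
    · simp
    · exact le_trans (ih _) (by simp)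

-- outer while loop over remain_days
def groupA : List Int → List Int
  | [] => []
  | d :: rest =>
    let r := consumeA d 1 rest
    r.1 :: groupA r.2
termination_by l => l.length
decreasing_by
  simpa using Nat.lt_succ_of_le (consumeA_snd_length d 1 rest)

def solution (progresses : List Int) (speeds : List Int) : List Int :=
  let remain_days0 := (List.range progresses.length).map
    (fun i => PySem.Int.floordiv (100 - progresses.getD i 0) (speeds.getD i 0))
  let remain_days := (List.range remain_days0.length).map
    (fun i => if PySem.Int.mod (100 - progresses.getD i 0) (speeds.getD i 0) ≠ 0
              then remain_days0.getD i 0 + 1 else remain_days0.getD i 0)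
  groupA remain_days

-- ===== PORT B =====
-- one step of B's loop; state = (current, answer reversed so answer[-1] is the head)
def stepB (st : Int × List Int) (d : Int) : Int × List Int :=
  match st.2 with
  | [] => (d, [1])
  | c :: r => if d ≤ st.1 then (st.1, (c + 1) :: r) else (d, 1 :: c :: r)

def solution_alt (progresses : List Int) (speeds : List Int) : List Int :=
  let days := (progresses.zip speeds).map
    (fun ps => PySem.Int.floordiv (100 - ps.1) ps.2 +
               (if PySem.Int.mod (100 - ps.1) ps.2 ≠ 0 then 1 else 0))
  ((days.foldl stepB (0, [])).2).reverse

-- ===== PRECONDITION & SPEC =====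
-- A raises IndexError when speeds is shorter than progresses, and ZeroDivisionError on a zero speed it reaches.
def Pre_solution (progresses : List Int) (speeds : List Int) : Prop :=
  progresses.length ≤ speeds.length ∧ ∀ i < progresses.length, speeds.getD i 0 ≠ 0
instance (progresses : List Int) (speeds : List Int) : Decidable (Pre_solution progresses speeds) := by unfold Pre_solution; infer_instance

def pvWitness_solution : List Int × List Int := ([93, 30, 55], [1, 30, 5])

def Spec_solution (progresses : List Int) (speeds : List Int) (out : List Int) : Prop := out = solution_alt progresses speeds
instance (progresses : List Int) (speeds : List Int) (out : List Int) : Decidable (Spec_solution progresses speeds out) := by unfold Spec_solution; infer_instance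

-- ===== CLAIM (what is proved, stated in full; the proofs are below) =====
def Claim_equal_solution : Prop := ∀ (progresses : List Int) (speeds : List Int), Dom_solution progresses speeds → Pre_solution progresses speeds → Spec_solution progresses speeds (solution progresses speeds)

-- ===== LEMMAS AND PROOFS =====

-- The grouping fold of B computes A's nested pop loop.
theorem foldl_stepB_consume (ds : List Int) (now c : Int) (rev : List Int) :
    ((ds.foldl stepB (now, c :: rev)).2).reverse
      = rev.reverse ++ (consumeA now c ds).1 :: groupA (consumeA now c ds).2 := by
  induction hn : ds.length using Nat.strong_induction_on generalizing ds now c rev with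
  | _ n ih =>
    cases ds with
    | nil => simp [consumeA, groupA]
    | cons d ds' =>
      by_cases h : d > now
      · have hstep : stepB (now, c :: rev) d = (d, 1 :: c :: rev) := by
          simp [stepB, not_le.mpr h]
        have hlen : ds'.length < n := by simp at hn; omega
        have := ih ds'.length hlen ds' d 1 (c :: rev) rfl
        simp only [List.foldl_cons, hstep] at *
        rw [this]
        simp [consumeA, h, groupA]
      · have hstep : stepB (now, c :: rev) d = (now, (c + 1) :: rev) := by
          simp [stepB, le_of_not_gt h]
        have hlen : ds'.length < n := by simp at hn; omega
        have := ih ds'.length hlen ds' now (c + 1) rev rfl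
        simp only [List.foldl_cons, hstep] at *
        rw [this]
        simp [consumeA, h]

theorem runB_eq_groupA (ds : List Int) :
    ((ds.foldl stepB (0, [])).2).reverse = groupA ds := by
  cases ds with
  | nil => simp [groupA]
  | cons d ds' =>
    have hstep : stepB (0, []) d = (d, [1]) := by simp [stepB]
    simp only [List.foldl_cons, hstep]
    have := foldl_stepB_consume ds' d 1 []
    rw [this]
    simp [groupA]

-- index-based double pass over range = zip-map, given the length condition
theorem range_map_eq_zip_map (f : Int → Int → Int) :
    ∀ (ps ss : List Int), ps.length ≤ ss.length →
    (List.range ps.length).map (fun i => f (ps.getD i 0) (ss.getD i 0))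
      = (ps.zip ss).map (fun x => f x.1 x.2) := by
  intro ps
  induction ps with
  | nil => intro ss _; simp
  | cons p ps' ih =>
    intro ss hlen
    cases ss with
    | nil => simp at hlen
    | cons s ss' =>
      simp only [List.length_cons, List.range_succ_eq_map, List.map_cons, List.map_map,
        List.zip_cons_cons]
      congr 1
      have := ih ss' (by simpa using hlen)
      simpa using this

theorem getD_range_map (f : Nat → Int) (n i : Nat) (h : i < n) :
    ((List.range n).map f).getD i 0 = f i := by
  rw [List.getD_eq_getElem?_getD]
  simp [List.getElem?_map, List.getElem?_range, h]

-- ===== VERDICT (by name: the statement is the Claim_ definition above) =====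
theorem solution_spec : Claim_equal_solution := by
  intro ps ss _ hpre
  show solution ps ss = solution_alt ps ss
  unfold solution solution_alt
  rw [← runB_eq_groupA]
  congr 1
  have hlen0 : ((List.range ps.length).map
      (fun i => PySem.Int.floordiv (100 - ps.getD i 0) (ss.getD i 0))).length = ps.length := by
    simp
  rw [hlen0]
  have h1 : (List.range ps.length).map
      (fun i => if PySem.Int.mod (100 - ps.getD i 0) (ss.getD i 0) ≠ 0
                then ((List.range ps.length).map
                  (fun i => PySem.Int.floordiv (100 - ps.getD i 0) (ss.getD i 0))).getD i 0 + 1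
                else ((List.range ps.length).map
                  (fun i => PySem.Int.floordiv (100 - ps.getD i 0) (ss.getD i 0))).getD i 0)
      = (List.range ps.length).map
      (fun i => PySem.Int.floordiv (100 - ps.getD i 0) (ss.getD i 0) +
                (if PySem.Int.mod (100 - ps.getD i 0) (ss.getD i 0) ≠ 0 then 1 else 0)) := by
    apply List.map_congr_left
    intro i hi
    have hi' : i < ps.length := List.mem_range.mp hi
    rw [getD_range_map _ _ _ hi']
    split <;> simp
  rw [h1, range_map_eq_zip_map (fun p s => PySem.Int.floordiv (100 - p) s +
        (if PySem.Int.mod (100 - p) s ≠ 0 then 1 else 0)) ps ss hpre.1]
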